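-- pv_equiv track=rewrite | github.com/jennyzzt/LLM_debate_on_ARC | ARC_gen_agents2_rounds2_openai/f2829549/agent0/algo.py | solve
-- ===== SOURCE A (Python) =====
-- def solve(input):
--     output = [[0, 0, 0] for _ in range(4)]  # Initialize the output grid with zeros
--
--     for i, row in enumerate(input):
--         # Find the index of the first occurrence of '1' if it exists
--         if 1 in row:
--             index_1 = row.index(1)
--
--             # First Column Rule: Check for at least two '7's before '1'
--             sevens_before_1 = row[:index_1].count(7)
--             if sevens_before_1 >= 2:
--                 output[i][0] = 3
--
--             # Second Column Rule: Check for a '5' immediately after '1'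
--             if index_1 + 1 < len(row) and row[index_1 + 1] == 5:
--                 output[i][1] = 3
--
--             # Third Column Rule: Check for at least two '5's after '1'
--             fives_after_1 = row[index_1:].count(5)
--             if fives_after_1 >= 2:
--                 output[i][2] = 3
--
--     return output
-- ===== SOURCE B (Python) =====
-- def solve(input):
--     output = [[0, 0, 0], [0, 0, 0], [0, 0, 0], [0, 0, 0]]
--
--     for i, row in enumerate(input):
--         # one fused left-to-right pass per row instead of separate index/slice/count scans
--         seen = False
--         first1 = -1
--         sevens = 0
--         fives = 0
--         nxt5 = False
--         for j, v in enumerate(row):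
--             if not seen:
--                 if v == 1:
--                     seen = True
--                     first1 = j
--                 elif v == 7:
--                     sevens += 1
--             else:
--                 if j == first1 + 1 and v == 5:
--                     nxt5 = True
--                 if v == 5:
--                     fives += 1
--         if seen:
--             if sevens >= 2:
--                 output[i][0] = 3
--             if nxt5:
--                 output[i][1] = 3
--             if fives >= 2:
--                 output[i][2] = 3
--
--     return output
-- ===== Notes on version B (the rewrite author's own statement) =====
-- stated objective: alternative
-- what changed: Replaces A's per-row membership test, .index, two slices and two .count scans with a single fused left-to-right pass per row that tracks seen/first-1-index/sevens-before/fives-after/immediate-next-is-5 in one state, then applies the same three writes.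
import Mathlib
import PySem

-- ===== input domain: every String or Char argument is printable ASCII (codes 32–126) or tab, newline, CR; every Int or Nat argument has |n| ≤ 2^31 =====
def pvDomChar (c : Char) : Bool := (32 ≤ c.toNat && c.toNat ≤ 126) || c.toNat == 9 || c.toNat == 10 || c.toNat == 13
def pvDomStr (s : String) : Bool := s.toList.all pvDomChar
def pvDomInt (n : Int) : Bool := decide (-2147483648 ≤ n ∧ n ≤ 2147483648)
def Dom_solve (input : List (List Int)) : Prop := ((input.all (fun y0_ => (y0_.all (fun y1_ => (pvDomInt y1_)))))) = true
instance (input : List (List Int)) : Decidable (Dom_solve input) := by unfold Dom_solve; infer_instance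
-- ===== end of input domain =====

-- B fuses A's per-row index/slice/count scans into one left-to-right pass per row (alternative decomposition, same cost); same return value, and both raise IndexError on the same >4-row inputs (excluded by Pre_).

-- output[i][j] = v  (both Pythons perform exactly this statement; total form, valid under Pre_)
def setCell (output : List (List Int)) (i : Int) (j : Int) (v : Int) : List (List Int) :=
  PySem.List.pySetD output i (PySem.List.pySetD (PySem.List.pyGetD output i []) j v)

-- ===== PORT A =====
def solveStep (output : List (List Int)) (p : Int × List Int) : List (List Int) :=
  if 1 ∈ p.2 then
    let index1 : Nat := (PySem.List.index? p.2 1).getD 0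
    let sevens := PySem.List.count (PySem.List.slice p.2 none (some (index1 : Int))) 7
    let o1 := if 2 ≤ sevens then setCell output p.1 0 3 else output
    let o2 := if (index1 : Int) + 1 < (p.2.length : Int) ∧ PySem.List.pyGetD p.2 ((index1 : Int) + 1) 0 = 5
              then setCell o1 p.1 1 3 else o1
    let fives := PySem.List.count (PySem.List.slice p.2 (some (index1 : Int)) none) 5
    if 2 ≤ fives then setCell o2 p.1 2 3 else o2
  else output

def solve (input : List (List Int)) : List (List Int) :=
  (PySem.List.enumerate input).foldl solveStep ((PySem.List.pyRange 0 4 1).map (fun _ => [0, 0, 0]))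

-- ===== PORT B =====
-- per-row scan state: (seen, first1, sevens, fives, nxt5)
def rowScan (st : Bool × Int × Int × Int × Bool) (q : Int × Int) : Bool × Int × Int × Int × Bool :=
  if !st.1 then
    if q.2 = 1 then (true, q.1, st.2.2.1, st.2.2.2.1, st.2.2.2.2)
    else if q.2 = 7 then (st.1, st.2.1, st.2.2.1 + 1, st.2.2.2.1, st.2.2.2.2)
    else st
  else
    (st.1, st.2.1, st.2.2.1,
     (if q.2 = 5 then st.2.2.2.1 + 1 else st.2.2.2.1),
     (if q.1 = st.2.1 + 1 ∧ q.2 = 5 then true else st.2.2.2.2))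

def solveAltStep (output : List (List Int)) (p : Int × List Int) : List (List Int) :=
  let st := (PySem.List.enumerate p.2).foldl rowScan (false, -1, 0, 0, false)
  if st.1 then
    let o1 := if 2 ≤ st.2.2.1 then setCell output p.1 0 3 else output
    let o2 := if st.2.2.2.2 then setCell o1 p.1 1 3 else o1
    if 2 ≤ st.2.2.2.1 then setCell o2 p.1 2 3 else o2
  else output

def solve_alt (input : List (List Int)) : List (List Int) :=
  (PySem.List.enumerate input).foldl solveAltStep [[0, 0, 0], [0, 0, 0], [0, 0, 0], [0, 0, 0]]

-- ===== PRECONDITION & SPEC =====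
-- one of the three rules fires on this row (closed form: membership and counts around the first 1)
def rowFires (row : List Int) : Bool :=
  let pre := row.takeWhile (fun v => v ≠ 1)
  let suf := row.drop (pre.length + 1)
  decide (1 ∈ row) && (decide (2 ≤ pre.count 7) || (suf.head? == some 5) || decide (2 ≤ suf.count 5))

-- Pre_ excludes exactly the inputs on which A raises IndexError: some row at index ≥ 4 fires a rule,
-- so A writes past its fixed 4-row output (B raises the same IndexError there).
def Pre_solve (input : List (List Int)) : Prop := ((input.drop 4).all (fun r => ! rowFires r)) = true
instance (input : List (List Int)) : Decidable (Pre_solve input) := by unfold Pre_solve; infer_instance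

def pvWitness_solve : List (List Int) := [[7, 7, 1, 5, 5], [0, 1, 5], []]

def Spec_solve (input : List (List Int)) (out : List (List Int)) : Prop := out = solve_alt input
instance (input : List (List Int)) (out : List (List Int)) : Decidable (Spec_solve input out) := by unfold Spec_solve; infer_instance

-- ===== CLAIM (what is proved, stated in full; the proofs are below) =====
def Claim_equal_solve : Prop := ∀ (input : List (List Int)), Dom_solve input → Pre_solve input → Spec_solve input (solve input)

-- ===== LEMMAS AND PROOFS =====

-- phase 1: before any 1 has been seen, the scan only counts 7s
theorem rowScan_no_one (l : List Int) (h : (1 : Int) ∉ l) (s f1 c fv : Int) (nx : Bool) :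
    (PySem.List.enumerate l s).foldl rowScan (false, f1, c, fv, nx)
      = (false, f1, c + (l.count 7 : Int), fv, nx) := by
  induction l generalizing s c with
  | nil => simp [PySem.List.enumerate_nil]
  | cons a t ih =>
    have ha : a ≠ 1 := fun e => h (by simp [e])
    have ht : (1 : Int) ∉ t := fun m => h (List.mem_cons_of_mem _ m)
    rw [PySem.List.enumerate_cons, List.foldl_cons]
    by_cases h7 : a = 7
    · have hstep : rowScan (false, f1, c, fv, nx) (s, a) = (false, f1, c + 1, fv, nx) := by
        simp [rowScan, h7]
      rw [hstep, ih ht]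
      simp [h7]
      ring
    · have hstep : rowScan (false, f1, c, fv, nx) (s, a) = (false, f1, c, fv, nx) := by
        simp [rowScan, ha, h7]
      rw [hstep, ih ht]
      simp [h7]

-- phase 2: after the first 1 (whose index is f1), at positions > f1 + 1, the scan only counts 5s
theorem rowScan_seen (l : List Int) (s f1 c fv : Int) (nx : Bool) (hs : f1 + 1 < s) :
    (PySem.List.enumerate l s).foldl rowScan (true, f1, c, fv, nx)
      = (true, f1, c, fv + (l.count 5 : Int), nx) := by
  induction l generalizing s fv with
  | nil => simp [PySem.List.enumerate_nil]
  | cons a t ih =>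
    have hns : ¬ (s = f1 + 1) := by omega
    rw [PySem.List.enumerate_cons, List.foldl_cons]
    have hstep : rowScan (true, f1, c, fv, nx) (s, a)
        = (true, f1, c, (if a = 5 then fv + 1 else fv), nx) := by
      simp [rowScan, hns]
    rw [hstep]
    by_cases h5 : a = 5
    · rw [if_pos h5, ih _ _ (by omega)]
      simp [h5]
      ring
    · rw [if_neg h5, ih _ _ (by omega)]
      simp [h5]

-- the whole scan of a row containing a 1
theorem rowScan_char (pre suf : List Int) (hpre : (1 : Int) ∉ pre) :
    (PySem.List.enumerate (pre ++ 1 :: suf)).foldl rowScan (false, -1, 0, 0, false)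
      = (true, (pre.length : Int), (pre.count 7 : Int), (suf.count 5 : Int), suf.head? == some 5) := by
  rw [PySem.List.enumerate_append, List.foldl_append, rowScan_no_one pre hpre,
    PySem.List.enumerate_cons, List.foldl_cons]
  have hstep : rowScan (false, -1, 0 + (pre.count 7 : Int), 0, false) ((0 : Int) + pre.length, 1)
      = (true, (0 : Int) + pre.length, 0 + (pre.count 7 : Int), 0, false) := by
    simp [rowScan]
  rw [hstep]
  cases suf with
  | nil => simp [PySem.List.enumerate_nil]
  | cons w rest =>
    rw [PySem.List.enumerate_cons, List.foldl_cons]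
    by_cases h5 : w = 5
    · have hstep2 : rowScan (true, (0 : Int) + pre.length, 0 + (pre.count 7 : Int), 0, false)
          (((0 : Int) + pre.length) + 1, w)
          = (true, (0 : Int) + pre.length, 0 + (pre.count 7 : Int), 1, true) := by
        simp [rowScan, h5]
      rw [hstep2, rowScan_seen rest _ _ _ _ _ (by omega)]
      simp [h5]
      ring
    · have hstep2 : rowScan (true, (0 : Int) + pre.length, 0 + (pre.count 7 : Int), 0, false)
          (((0 : Int) + pre.length) + 1, w)
          = (true, (0 : Int) + pre.length, 0 + (pre.count 7 : Int), 0, false) := by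
        simp [rowScan, h5]
      rw [hstep2, rowScan_seen rest _ _ _ _ _ (by omega)]
      simp [h5]

theorem step_eq (out : List (List Int)) (p : Int × List Int) :
    solveStep out p = solveAltStep out p := by
  obtain ⟨i, row⟩ := p
  by_cases h1 : (1 : Int) ∈ row
  · have hk : ∃ k, PySem.List.index? row 1 = some k :=
      Option.isSome_iff_exists.mp ((PySem.List.index?_isSome_iff row 1).mpr h1)
    obtain ⟨k, hk⟩ := hk
    obtain ⟨pre, suf, hrow, hlen, hnp⟩ := (PySem.List.index?_eq_some_iff row 1 k).mp hk
    subst hrow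
    subst hlen
    simp only [solveStep, solveAltStep]
    rw [rowScan_char pre suf hnp, if_pos h1, hk, Option.getD_some]
    have hslice1 : PySem.List.slice (pre ++ 1 :: suf) none (some (pre.length : Int)) = pre := by
      rw [PySem.List.slice_to_natCast]; exact List.take_left
    have hslice2 : PySem.List.slice (pre ++ 1 :: suf) (some (pre.length : Int)) none = 1 :: suf := by
      rw [PySem.List.slice_from_natCast]; exact List.drop_left
    rw [hslice1, hslice2]
    cases suf with
    | nil => simp
    | cons w rest =>
      have hcast : ((pre.length : Int) + 1) = (((pre.length + 1 : Nat)) : Int) := by push_cast; ring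
      have hget : (pre ++ 1 :: w :: rest).getD (pre.length + 1) 0 = w := by
        simp [List.getD_eq_getElem?_getD]
      rw [hcast, PySem.List.pyGetD_natCast, hget]
      by_cases h5 : w = 5
      · simp [h5, PySem.List.count_eq]
        rw [if_congr
          (by rw [← List.count_pos_iff]; omega :
            (5 ∈ rest) ↔ (2 ≤ ((List.count 5 rest : Nat) : Int) + 1)) rfl rfl]
        rfl
      · simp [h5, PySem.List.count_eq]
        rfl
  · simp only [solveStep, solveAltStep]
    rw [if_neg h1, rowScan_no_one row h1]
    simp

-- ===== VERDICT (by name: the statement is the Claim_ definition above) =====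
theorem solve_spec : Claim_equal_solve := by
  intro input _ _
  unfold Spec_solve solve solve_alt
  have hinit : ((PySem.List.pyRange 0 4 1).map (fun _ => ([0, 0, 0] : List Int)))
      = [[0, 0, 0], [0, 0, 0], [0, 0, 0], [0, 0, 0]] := by decide
  rw [hinit]
  have hfold : ∀ (l : List (Int × List Int)) (a : List (List Int)),
      l.foldl solveStep a = l.foldl solveAltStep a := by
    intro l
    induction l with
    | nil => intro a; rfl
    | cons x t ih => intro a; rw [List.foldl_cons, List.foldl_cons, step_eq, ih]
  exact hfold _ _
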